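-- pv_equiv track=rewrite | github.com/rayendito/lowreso-augment | src/utils/substitute_permutation.py | get_all_substitution_permutation
-- ===== SOURCE A (Python) =====
-- def get_all_substitution_permutation(synonyms, tokenized_txt):
--     dict_counter = {idx : {key : 0} for idx, key in enumerate(synonyms.keys())}
--     def _get_counter_idx_key(idx):
--         return list(dict_counter[idx])[0]
--
--     def _all_not_at_max():
--         for i in dict_counter:
--             if(dict_counter[i][_get_counter_idx_key(i)] < len(synonyms[_get_counter_idx_key(i)])-1):
--                 return True
--         return False
--
--     def _up_counter():
--         dict_counter[0][_get_counter_idx_key(0)] += 1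
--         for i in range(len(dict_counter)-1):
--             if(dict_counter[i][_get_counter_idx_key(i)] == len(synonyms[_get_counter_idx_key(i)])):
--                 dict_counter[i][_get_counter_idx_key(i)] = 0
--                 dict_counter[i+1][_get_counter_idx_key(i+1)] += 1
--
--     def _replace_words_based_on_counter():
--         for i in dict_counter:
--             replace_word_with = dict_counter[i][_get_counter_idx_key(i)]
--             tokenized_txt[_get_counter_idx_key(i)] = synonyms[_get_counter_idx_key(i)][replace_word_with]
--
--     new_sentences = []
--     while(_all_not_at_max()):
--         # up counter
--         _up_counter()
--
--         # replace
--         _replace_words_based_on_counter()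
--
--         # append to new_sents
--         new_sentences.append(" ".join(tokenized_txt))
--
--     return new_sentences
-- ===== SOURCE B (Python) =====
-- # Different algorithm: build the full cartesian product (first position varying
-- # fastest) by structural recursion, skip the all-original first combination,
-- # and write each combination into tokenized_txt (same in-place mutation as A).
-- def _prod_first_fastest(lists):
--     if not lists:
--         return [[]]
--     return [[x] + rest for rest in _prod_first_fastest(lists[1:]) for x in lists[0]]
--
-- def get_all_substitution_permutation(synonyms, tokenized_txt):
--     positions = list(synonyms.keys())
--     lists = [synonyms[p] for p in positions]
--     new_sentences = []
--     for combo in _prod_first_fastest(lists)[1:]: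
--         for pos, word in zip(positions, combo):
--             tokenized_txt[pos] = word
--         new_sentences.append(" ".join(tokenized_txt))
--     return new_sentences
-- ===== Notes on version B (the rewrite author's own statement) =====
-- stated objective: alternative
-- what changed: A simulates a mixed-radix odometer stored in a dict-of-dicts and re-checks/advances it once per output sentence; B instead builds the cartesian product of the synonym lists by structural recursion (first position varying fastest), drops the all-original first combination, and writes each combination into the token list.
import Mathlib
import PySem

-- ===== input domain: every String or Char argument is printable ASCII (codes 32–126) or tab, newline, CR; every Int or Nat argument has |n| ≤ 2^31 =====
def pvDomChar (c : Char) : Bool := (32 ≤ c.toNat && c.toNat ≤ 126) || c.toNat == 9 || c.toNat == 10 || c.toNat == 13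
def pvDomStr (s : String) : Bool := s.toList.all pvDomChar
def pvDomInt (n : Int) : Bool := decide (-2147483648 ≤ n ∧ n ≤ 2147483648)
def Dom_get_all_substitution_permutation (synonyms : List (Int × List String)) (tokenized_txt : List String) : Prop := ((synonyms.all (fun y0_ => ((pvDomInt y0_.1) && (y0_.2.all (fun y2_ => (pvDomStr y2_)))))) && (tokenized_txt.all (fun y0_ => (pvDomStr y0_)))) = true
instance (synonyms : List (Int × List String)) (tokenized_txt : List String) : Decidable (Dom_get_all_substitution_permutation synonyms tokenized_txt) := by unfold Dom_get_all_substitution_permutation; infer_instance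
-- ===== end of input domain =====

-- B replaces A's hand-rolled dict-of-dicts odometer by a structurally recursive
-- cartesian product of the synonym lists (alternative algorithm, same cost).
-- Both Pythons mutate `tokenized_txt` in place in the same way; the equivalence
-- proved here is about the RETURN value.

-- ===== PORT A =====
-- The Python `synonyms` argument is a dict; `PySem.Dict.ofList` rebuilds it from
-- the association list exactly as `dict(pairs)` does (last value wins).
-- `_get_counter_idx_key(idx)` = `list(dict_counter[idx])[0]`: the inner dict is a
-- singleton whose key never changes; `headD 0` is its first (only) key.
def pvCK (dc : PySem.Dict Int (PySem.Dict Int Int)) (i : Int) : Int :=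
  ((dc.getD i PySem.Dict.empty).keys).headD 0

-- `_all_not_at_max`: a for-loop with early return True over dict_counter's keys.
def pvAllNotAtMax (d : PySem.Dict Int (List String)) (dc : PySem.Dict Int (PySem.Dict Int Int)) : Bool :=
  dc.keys.any (fun i =>
    (dc.getD i PySem.Dict.empty).getD (pvCK dc i) 0 < ((d.getD (pvCK dc i) []).length : Int) - 1)

-- `_up_counter`; `dict_counter[i][k] += 1` is Dict.modify (the keys are always present,
-- so the KeyError branch of `+=` is unreachable and the defaults below are never used).
def pvUpCounter (d : PySem.Dict Int (List String)) (dc : PySem.Dict Int (PySem.Dict Int Int)) :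
    PySem.Dict Int (PySem.Dict Int Int) :=
  let dc0 := dc.modify 0 PySem.Dict.empty (fun inner => inner.modify (pvCK dc 0) 0 (· + 1))
  (PySem.List.pyRange 0 ((dc0.size : Int) - 1)).foldl (fun dc i =>
    if (dc.getD i PySem.Dict.empty).getD (pvCK dc i) 0 == ((d.getD (pvCK dc i) []).length : Int) then
      let dc1 := dc.insert i ((dc.getD i PySem.Dict.empty).insert (pvCK dc i) 0)
      dc1.modify (i + 1) PySem.Dict.empty (fun inner => inner.modify (pvCK dc1 (i + 1)) 0 (· + 1))
    else dc) dc0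

-- `_replace_words_based_on_counter`; `synonyms[k][w]` / `tokenized_txt[k] = …` via
-- pyGetD/pySetD, which return a default / leave the list unchanged exactly where
-- Python raises IndexError (Pre_ excludes those inputs).
def pvReplace (d : PySem.Dict Int (List String)) (dc : PySem.Dict Int (PySem.Dict Int Int))
    (txt : List String) : List String :=
  dc.keys.foldl (fun txt i =>
    PySem.List.pySetD txt (pvCK dc i)
      (PySem.List.pyGetD (d.getD (pvCK dc i) []) ((dc.getD i PySem.Dict.empty).getD (pvCK dc i) 0) "")) txt

-- the while-loop, with fuel; prod(lengths)+1 iterations always suffice (proved below).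
def pvLoopA (d : PySem.Dict Int (List String)) :
    Nat → PySem.Dict Int (PySem.Dict Int Int) → List String → List String → List String
  | 0, _, _, acc => acc
  | fuel + 1, dc, txt, acc =>
    if pvAllNotAtMax d dc then
      let dc' := pvUpCounter d dc
      let txt' := pvReplace d dc' txt
      pvLoopA d fuel dc' txt' (acc ++ [PySem.Str.join " " txt'])
    else acc

def get_all_substitution_permutation (synonyms : List (Int × List String)) (tokenized_txt : List String) : List String :=
  let d := PySem.Dict.ofList synonyms
  let dc := (PySem.List.enumerate d.keys).foldl
    (fun dc p => dc.insert p.1 (PySem.Dict.mk [(p.2, (0 : Int))])) PySem.Dict.empty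
  pvLoopA d ((d.items.map (fun p => p.2.length)).prod + 1) dc tokenized_txt []

-- ===== PORT B =====
-- `_prod_first_fastest`: cartesian product, FIRST list varying fastest, by recursion.
def pvProdFF : List (List String) → List (List String)
  | [] => [[]]
  | L :: Ls => (pvProdFF Ls).flatMap (fun rest => L.map (fun x => x :: rest))

-- `for pos, word in zip(positions, combo): tokenized_txt[pos] = word`
def pvWrite (positions : List Int) (combo : List String) (txt : List String) : List String :=
  (positions.zip combo).foldl (fun t pw => PySem.List.pySetD t pw.1 pw.2) txt

def get_all_substitution_permutation_alt (synonyms : List (Int × List String)) (tokenized_txt : List String) : List String :=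
  let d := PySem.Dict.ofList synonyms
  let positions := d.keys
  let lists := positions.map (fun p => d.getD p [])
  (((pvProdFF lists).drop 1).foldl (fun s combo =>
      let txt' := pvWrite positions combo s.1
      (txt', s.2 ++ [PySem.Str.join " " txt'])) (tokenized_txt, ([] : List String))).2

-- ===== PRECONDITION & SPEC =====
-- Pre_ excludes exactly the inputs where the Python A raises IndexError: those where
-- the substitution loop runs (some synonym list has ≥ 2 entries) while some synonym
-- list is empty or some key is out of range of tokenized_txt.
def Pre_get_all_substitution_permutation (synonyms : List (Int × List String)) (tokenized_txt : List String) : Prop :=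
  (∃ p ∈ (PySem.Dict.ofList synonyms).items, 2 ≤ p.2.length) →
    ∀ p ∈ (PySem.Dict.ofList synonyms).items, p.2 ≠ [] ∧ PySem.Raise.InRange tokenized_txt.length p.1
instance (synonyms : List (Int × List String)) (tokenized_txt : List String) : Decidable (Pre_get_all_substitution_permutation synonyms tokenized_txt) := by unfold Pre_get_all_substitution_permutation; infer_instance

def pvWitness_get_all_substitution_permutation : (List (Int × List String)) × List String :=
  ([((0 : Int), ["x", "y"])], ["a", "b"])

def Spec_get_all_substitution_permutation (synonyms : List (Int × List String)) (tokenized_txt : List String) (out : List String) : Prop := out = get_all_substitution_permutation_alt synonyms tokenized_txt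
instance (synonyms : List (Int × List String)) (tokenized_txt : List String) (out : List String) : Decidable (Spec_get_all_substitution_permutation synonyms tokenized_txt out) := by unfold Spec_get_all_substitution_permutation; infer_instance

-- ===== CLAIM (what is proved, stated in full; the proofs are below) =====
def Claim_equal_get_all_substitution_permutation : Prop := ∀ (synonyms : List (Int × List String)) (tokenized_txt : List String), Dom_get_all_substitution_permutation synonyms tokenized_txt → Pre_get_all_substitution_permutation synonyms tokenized_txt → Spec_get_all_substitution_permutation synonyms tokenized_txt (get_all_substitution_permutation synonyms tokenized_txt)
-- ===== LEMMAS AND PROOFS =====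

-- ---- abstract mixed-radix machinery (little-endian digits; proof-side only) ----

def pvTup : List Nat → List (List Nat)
  | [] => [[]]
  | r :: rs => (pvTup rs).flatMap (fun t => (List.range r).map (· :: t))

def pvCnt : List Nat → List Nat → Nat
  | d :: ds, r :: rs => d + r * pvCnt ds rs
  | _, _ => 0

def pvIncr : List Nat → List Nat → List Nat
  | d :: ds, r :: rs => if d + 1 = r then 0 :: pvIncr ds rs else (d + 1) :: ds
  | _, _ => []

def pvNotMax : List Nat → List Nat → Bool
  | d :: ds, r :: rs => decide (d + 1 < r) || pvNotMax ds rs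
  | _, _ => false

def pvValid (ds rs : List Nat) : Prop := List.Forall₂ (· < ·) ds rs

def pvSel (lists : List (List String)) (t : List Nat) : List String :=
  List.zipWith (fun i L => L.getD i "") t lists

def pvStep (ps : List Int) (lists : List (List String)) (s : List String × List String)
    (t : List Nat) : List String × List String :=
  let txt' := pvWrite ps (pvSel lists t) s.1
  (txt', s.2 ++ [PySem.Str.join " " txt'])

def pvCarry (rs : List Nat) (e : List Nat) (i : Nat) : List Nat :=
  if e.getD i 0 = rs.getD i 0 then (e.set i 0).set (i + 1) (e.getD (i + 1) 0 + 1) else e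

def pvInv (ps : List Int) (ds : List Nat) (dc : PySem.Dict Int (PySem.Dict Int Int)) : Prop :=
  ds.length = ps.length ∧
  dc.keys = (List.range ps.length).map (fun j : Nat => (j : Int)) ∧
  ∀ j : Nat, j < ps.length → dc.get? (j : Int) = some (PySem.Dict.mk [(ps.getD j 0, (ds.getD j 0 : Int))])

lemma pvValid_getD {ds rs : List Nat} (h : pvValid ds rs) {j : Nat} (hj : j < ds.length) :
    ds.getD j 0 < rs.getD j 0 := by
  induction h generalizing j with
  | nil => simp at hj
  | cons h _ ih =>
    cases j with
    | zero => simpa using h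
    | succ j => simpa using ih (by simpa using hj)

lemma pvCnt_succ_le_prod {ds rs : List Nat} (h : pvValid ds rs) : pvCnt ds rs + 1 ≤ rs.prod := by
  induction h with
  | nil => simp [pvCnt]
  | @cons d r ds rs h _ ih =>
    simp only [pvCnt, List.prod_cons]
    calc d + r * pvCnt ds rs + 1 ≤ r * pvCnt ds rs + r := by omega
    _ = r * (pvCnt ds rs + 1) := by ring
    _ ≤ r * rs.prod := Nat.mul_le_mul_left r ih

lemma pvNotMax_false_cnt {ds rs : List Nat} (h : pvValid ds rs) (hm : pvNotMax ds rs = false) :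
    pvCnt ds rs + 1 = rs.prod := by
  induction h with
  | nil => simp [pvCnt]
  | @cons d r ds rs h _ ih =>
    simp only [pvNotMax, Bool.or_eq_false_iff, decide_eq_false_iff_not] at hm
    have hd : d + 1 = r := by omega
    have := ih hm.2
    simp only [pvCnt, List.prod_cons]
    calc d + r * pvCnt ds rs + 1 = r * pvCnt ds rs + r := by omega
    _ = r * (pvCnt ds rs + 1) := by ring
    _ = r * rs.prod := by rw [this]

lemma pvNotMax_true_cnt {ds rs : List Nat} (h : pvValid ds rs) (hm : pvNotMax ds rs = true) :
    pvCnt ds rs + 1 < rs.prod := by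
  induction h with
  | nil => simp [pvNotMax] at hm
  | @cons d r ds rs h htail ih =>
    have htailc := pvCnt_succ_le_prod htail
    simp only [pvNotMax, Bool.or_eq_true, decide_eq_true_eq] at hm
    simp only [pvCnt, List.prod_cons]
    rcases hm with hm | hm
    · calc d + r * pvCnt ds rs + 1 < r * pvCnt ds rs + r := by omega
      _ = r * (pvCnt ds rs + 1) := by ring
      _ ≤ r * rs.prod := Nat.mul_le_mul_left r htailc
    · have := ih hm
      calc d + r * pvCnt ds rs + 1 ≤ r * pvCnt ds rs + r := by omega
      _ = r * (pvCnt ds rs + 1) := by ring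
      _ < r * rs.prod := by
            have hr : 0 < r := by omega
            exact (Nat.mul_lt_mul_left hr).mpr this

lemma pvIncr_valid {ds rs : List Nat} (h : pvValid ds rs) (hm : pvNotMax ds rs = true) :
    pvValid (pvIncr ds rs) rs := by
  induction h with
  | nil => simp [pvNotMax] at hm
  | @cons d r ds rs h htail ih =>
    simp only [pvNotMax, Bool.or_eq_true, decide_eq_true_eq] at hm
    by_cases hd : d + 1 = r
    · have hm' : pvNotMax ds rs = true := by rcases hm with hm | hm; omega; exact hm
      rw [show pvIncr (d :: ds) (r :: rs) = 0 :: pvIncr ds rs by rw [pvIncr, if_pos hd]]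
      exact List.Forall₂.cons (by omega) (ih hm')
    · rw [show pvIncr (d :: ds) (r :: rs) = (d + 1) :: ds by rw [pvIncr, if_neg hd]]
      exact List.Forall₂.cons (by omega) htail

lemma pvCnt_incr {ds rs : List Nat} (h : pvValid ds rs) (hm : pvNotMax ds rs = true) :
    pvCnt (pvIncr ds rs) rs = pvCnt ds rs + 1 := by
  induction h with
  | nil => simp [pvNotMax] at hm
  | @cons d r ds rs h htail ih =>
    simp only [pvNotMax, Bool.or_eq_true, decide_eq_true_eq] at hm
    by_cases hd : d + 1 = r
    · have hm' : pvNotMax ds rs = true := by rcases hm with hm | hm; omega; exact hm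
      rw [show pvIncr (d :: ds) (r :: rs) = 0 :: pvIncr ds rs by rw [pvIncr, if_pos hd]]
      simp only [pvCnt, ih hm']
      subst hd
      ring
    · rw [show pvIncr (d :: ds) (r :: rs) = (d + 1) :: ds by rw [pvIncr, if_neg hd]]
      simp only [pvCnt]
      omega

lemma pvCnt_replicate_zero : ∀ (rs : List Nat) (m : Nat), pvCnt (List.replicate m 0) rs = 0 := by
  intro rs
  induction rs with
  | nil => intro m; cases m <;> simp [pvCnt]
  | cons r rs ih =>
    intro m
    cases m with
    | zero => simp [pvCnt]
    | succ m => simp [pvCnt, List.replicate_succ, ih]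

lemma pvValid_replicate {rs : List Nat} (h : ∀ r ∈ rs, 0 < r) :
    pvValid (List.replicate rs.length 0) rs := by
  induction rs with
  | nil => simp [pvValid]
  | cons r rs ih =>
    simp only [List.length_cons, List.replicate_succ]
    exact List.Forall₂.cons (h r (by simp)) (ih (fun x hx => h x (by simp [hx])))

lemma pvTup_length (rs : List Nat) : (pvTup rs).length = rs.prod := by
  induction rs with
  | nil => simp [pvTup]
  | cons r rs ih =>
    simp [pvTup, List.length_flatMap, List.map_const', ih, Nat.mul_comm]

lemma pv_flatMap_get? {α β : Type} (l : List α) (f : α → List β) (r : Nat)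
    (hf : ∀ t ∈ l, (f t).length = r) (d : Nat) (hd : d < r) :
    ∀ q, (l.flatMap f)[d + r * q]? = l[q]?.bind (fun t => (f t)[d]?) := by
  induction l with
  | nil => intro q; simp
  | cons t l ih =>
    intro q
    have hlen : (f t).length = r := hf t (by simp)
    cases q with
    | zero =>
      simp only [List.flatMap_cons, Nat.mul_zero, Nat.add_zero]
      rw [List.getElem?_append_left (by omega)]
      simp
    | succ q =>
      have hmul : r * (q + 1) = r * q + r := by ring
      simp only [List.flatMap_cons]
      rw [List.getElem?_append_right (by omega)]
      have harith : d + r * (q + 1) - (f t).length = d + r * q := by omega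
      rw [harith, ih (fun x hx => hf x (by simp [hx])) q]
      simp

lemma pvTup_get? {ds rs : List Nat} (h : pvValid ds rs) : (pvTup rs)[pvCnt ds rs]? = some ds := by
  induction h with
  | nil => simp [pvTup, pvCnt]
  | @cons d r ds rs h _ ih =>
    simp only [pvTup, pvCnt]
    rw [pv_flatMap_get? _ _ r (by intro t _; simp) d h]
    rw [ih]
    simp [List.getElem?_range h]

lemma pvTup_drop_cons {ds rs : List Nat} (h : pvValid ds rs)
    (hlt : pvCnt ds rs < (pvTup rs).length) :
    (pvTup rs).drop (pvCnt ds rs) = ds :: (pvTup rs).drop (pvCnt ds rs + 1) := by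
  rw [← List.getElem_cons_drop hlt]
  have h2 := pvTup_get? h
  rw [List.getElem?_eq_getElem hlt] at h2
  simp only [Option.some_inj] at h2
  rw [h2]

-- ---- generic list helpers ----

lemma pv_foldl_sim {α β γ : Type} {R : α → β → Prop} (l : List γ) (f : α → γ → α) (g : β → γ → β) :
    ∀ {a : α} {b : β}, R a b → (∀ x ∈ l, ∀ a b, R a b → R (f a x) (g b x)) →
      R (l.foldl f a) (l.foldl g b) := by
  induction l with
  | nil => intro a b h _; simpa using h
  | cons x l ih =>
    intro a b h hs
    simp only [List.foldl_cons]
    exact ih (hs x (by simp) a b h) (fun y hy => hs y (by simp [hy]))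

lemma pv_getD_map {α β : Type} (f : α → β) (l : List α) (j : Nat) (hj : j < l.length)
    (da : α) (db : β) : (l.map f).getD j db = f (l.getD j da) := by
  rw [List.getD_eq_getElem _ _ (by simpa using hj), List.getD_eq_getElem _ _ hj]
  simp

lemma pv_map_eq_range {α β : Type} (L : List α) (g : α → β) (dx : α) :
    L.map g = (List.range L.length).map (fun i => g (L.getD i dx)) := by
  induction L with
  | nil => simp
  | cons x L ih =>
    simp only [List.map_cons, List.length_cons, List.range_succ_eq_map, List.map_map,
      Function.comp_def, List.getD_cons_succ, List.getD_cons_zero]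
    rw [ih]

lemma pv_foldl_zip_range {α β γ : Type} (dx : α) (dy : β) (f : γ → α × β → γ) :
    ∀ (xs : List α) (ys : List β) (a : γ), ys.length = xs.length →
      (xs.zip ys).foldl f a =
      (List.range xs.length).foldl (fun a j => f a (xs.getD j dx, ys.getD j dy)) a := by
  intro xs
  induction xs with
  | nil => intro ys a _; simp
  | cons x xs ih =>
    intro ys a h
    cases ys with
    | nil => simp at h
    | cons y ys =>
      simp only [List.zip_cons_cons, List.foldl_cons, List.length_cons, List.range_succ_eq_map,
        List.foldl_map, List.getD_cons_zero, List.getD_cons_succ]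
      exact ih ys _ (by simpa using h)

lemma pvNotMax_eq_range : ∀ (ds rs : List Nat),
    pvNotMax ds rs = (List.range ds.length).any (fun j => decide (ds.getD j 0 + 1 < rs.getD j 0)) := by
  intro ds
  induction ds with
  | nil => intro rs; simp [pvNotMax]
  | cons d ds ih =>
    intro rs
    cases rs with
    | nil =>
      simp only [pvNotMax, List.length_cons, List.range_succ_eq_map, List.any_cons, List.any_map,
        Function.comp_def, List.getD_cons_zero, List.getD_cons_succ, List.getD_nil]
      simp
    | cons r rs =>
      simp only [pvNotMax, List.length_cons, List.range_succ_eq_map, List.any_cons, List.any_map,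
        Function.comp_def, List.getD_cons_zero, List.getD_cons_succ]
      rw [ih rs]

lemma pvProdFF_eq (lists : List (List String)) :
    pvProdFF lists = (pvTup (lists.map List.length)).map (pvSel lists) := by
  induction lists with
  | nil => simp [pvProdFF, pvTup, pvSel]
  | cons L Ls ih =>
    simp only [pvProdFF, ih, List.map_cons, pvTup, List.map_flatMap, List.flatMap_map,
      List.map_map]
    apply List.flatMap_congr
    intro t _
    rw [pv_map_eq_range L (fun x => x :: pvSel Ls t) ""]
    apply List.map_congr_left
    intro i _
    simp [pvSel]

-- ---- the dict-of-dicts simulation ----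

lemma pv_singleton_getD (k : Int) (c : Int) : (PySem.Dict.mk [(k, c)]).getD k 0 = c := by
  simp [PySem.Dict.getD, PySem.Dict.get?]

lemma pv_singleton_insert (k : Int) (c v : Int) :
    (PySem.Dict.mk [(k, c)]).insert k v = PySem.Dict.mk [(k, v)] := by
  simp [PySem.Dict.insert, PySem.Dict.contains]

lemma pv_singleton_modify (k : Int) (c : Int) (f : Int → Int) :
    (PySem.Dict.mk [(k, c)]).modify k 0 f = PySem.Dict.mk [(k, f c)] := by
  rw [PySem.Dict.modify, pv_singleton_getD, pv_singleton_insert]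

lemma pvInv_getD {ps ds dc} (h : pvInv ps ds dc) {j : Nat} (hj : j < ps.length) :
    dc.getD (j : Int) PySem.Dict.empty = PySem.Dict.mk [(ps.getD j 0, (ds.getD j 0 : Int))] := by
  simp [PySem.Dict.getD, h.2.2 j hj]

lemma pvInv_ck {ps ds dc} (h : pvInv ps ds dc) {j : Nat} (hj : j < ps.length) :
    pvCK dc (j : Int) = ps.getD j 0 := by
  simp [pvCK, pvInv_getD h hj]

lemma pvInv_counterval {ps ds dc} (h : pvInv ps ds dc) {j : Nat} (hj : j < ps.length) :
    (dc.getD (j : Int) PySem.Dict.empty).getD (pvCK dc (j : Int)) 0 = (ds.getD j 0 : Int) := by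
  rw [pvInv_ck h hj, pvInv_getD h hj, pv_singleton_getD]

lemma pvInv_contains {ps ds dc} (h : pvInv ps ds dc) {j : Nat} (hj : j < ps.length) :
    dc.contains (j : Int) = true := by
  rw [PySem.Dict.contains_iff_mem_keys, h.2.1]
  exact List.mem_map_of_mem (by simpa using hj)

lemma pvInv_size {ps ds dc} (h : pvInv ps ds dc) : dc.size = ps.length := by
  have h2 : dc.keys.length = ps.length := by rw [h.2.1]; simp
  simpa [PySem.Dict.keys, PySem.Dict.size] using h2

lemma pvInv_set {ps ds dc} (h : pvInv ps ds dc) {i : Nat} (hi : i < ps.length) (c : Nat) :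
    pvInv ps (ds.set i c) (dc.insert (i : Int) (PySem.Dict.mk [(ps.getD i 0, (c : Int))])) := by
  obtain ⟨hlen, hkeys, hget⟩ := h
  refine ⟨by simpa using hlen, ?_, ?_⟩
  · rw [PySem.Dict.keys_insert_of_contains _ _ (pvInv_contains ⟨hlen, hkeys, hget⟩ hi)]
    exact hkeys
  · intro j hj
    rw [PySem.Dict.get?_insert]
    by_cases hji : j = i
    · subst hji
      rw [if_pos rfl]
      have hset : (ds.set j c).getD j 0 = c := by
        rw [List.getD_eq_getElem _ _ (by simpa [hlen] using hj)]
        exact List.getElem_set_self _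
      rw [hset]
    · rw [if_neg (by exact_mod_cast hji), hget j hj]
      have hset : (ds.set i c).getD j 0 = ds.getD j 0 := by
        by_cases hjl : j < ds.length
        · rw [List.getD_eq_getElem _ _ (by simpa using hjl), List.getD_eq_getElem _ _ hjl]
          exact List.getElem_set_ne (fun he => hji he.symm) _
        · rw [List.getD_eq_default _ _ (by simpa using Nat.le_of_not_lt hjl),
            List.getD_eq_default _ _ (Nat.le_of_not_lt hjl)]
      rw [hset]

-- the carry cascade on plain digit lists
lemma pvCarry_succ (r : Nat) (rs : List Nat) (x : Nat) (e : List Nat) (i : Nat) :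
    pvCarry (r :: rs) (x :: e) (i + 1) = x :: pvCarry rs e i := by
  unfold pvCarry
  simp only [List.getD_cons_succ, List.set_cons_succ]
  split <;> rfl

lemma pv_foldl_carry_shift (r : Nat) (rs : List Nat) (x : Nat) :
    ∀ (l : List Nat) (e : List Nat),
      ((l.map Nat.succ).foldl (pvCarry (r :: rs)) (x :: e)) = x :: l.foldl (pvCarry rs) e := by
  intro l
  induction l with
  | nil => intro e; simp
  | cons i l ih =>
    intro e
    simp only [List.map_cons, List.foldl_cons]
    rw [show i.succ = i + 1 from rfl, pvCarry_succ]
    exact ih _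

lemma pvCarry_noop_step {e rs : List Nat} (hv : pvValid e rs) (i : Nat) : pvCarry rs e i = e := by
  unfold pvCarry
  by_cases hi : i < e.length
  · rw [if_neg (Nat.ne_of_lt (pvValid_getD hv hi))]
  · have hle : e.length ≤ i := Nat.le_of_not_lt hi
    split
    · rw [List.set_eq_of_length_le hle, List.set_eq_of_length_le (by omega)]
    · rfl

lemma pvCarry_noop {e rs : List Nat} (hv : pvValid e rs) :
    ∀ k, (List.range k).foldl (pvCarry rs) e = e := by
  intro k
  induction k with
  | zero => simp
  | succ k ih => rw [List.range_succ, List.foldl_append, ih]; simpa using pvCarry_noop_step hv k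

lemma pvCarry_chain {ds rs : List Nat} (h : pvValid ds rs) :
    pvNotMax ds rs = true →
      (List.range (ds.length - 1)).foldl (pvCarry rs) (ds.set 0 (ds.getD 0 0 + 1)) =
        pvIncr ds rs := by
  induction h with
  | nil => intro hm; simp [pvNotMax] at hm
  | @cons d r ds rs hdr htail ih =>
    intro hm
    simp only [pvNotMax, Bool.or_eq_true, decide_eq_true_eq] at hm
    cases htail with
    | nil =>
      have hd : d + 1 < r := by
        rcases hm with hm | hm
        · exact hm
        · simp [pvNotMax] at hm
      simp only [List.set_cons_zero, List.getD_cons_zero, List.length_cons, List.length_nil]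
      rw [show (1 : Nat) - 1 = 0 from rfl]
      simp only [List.range_zero, List.foldl_nil]
      rw [pvIncr, if_neg (by omega)]
    | @cons e q ds'' rs'' heq htail' =>
      have hIH := ih
      simp only [List.set_cons_zero, List.getD_cons_zero, List.length_cons]
      rw [show ds''.length + 1 + 1 - 1 = ds''.length + 1 from rfl]
      rw [List.range_succ_eq_map, List.foldl_cons]
      by_cases hd : d + 1 = r
      · have hm' : pvNotMax (e :: ds'') (q :: rs'') = true := by
          rcases hm with hm | hm
          · omega
          · exact hm
        have hstep : pvCarry (r :: q :: rs'') ((d + 1) :: e :: ds'') 0 = 0 :: (e + 1) :: ds'' := by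
          unfold pvCarry
          simp only [List.getD_cons_zero, List.set_cons_zero, List.getD_cons_succ,
            List.set_cons_succ]
          rw [if_pos hd]
        rw [hstep, pv_foldl_carry_shift]
        have := hIH hm'
        simp only [List.set_cons_zero, List.getD_cons_zero, List.length_cons,
          Nat.add_sub_cancel] at this
        rw [this, show pvIncr (d :: e :: ds'') (r :: q :: rs'') = 0 :: pvIncr (e :: ds'') (q :: rs'')
          from by rw [pvIncr, if_pos hd]]
      · have hstep : pvCarry (r :: q :: rs'') ((d + 1) :: e :: ds'') 0 = (d + 1) :: e :: ds'' := by
          unfold pvCarry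
          simp only [List.getD_cons_zero]
          rw [if_neg hd]
        rw [hstep, pv_foldl_carry_shift]
        rw [pvCarry_noop (List.Forall₂.cons heq htail') _]
        rw [pvIncr, if_neg hd]

lemma pv_getD_set_ne {α : Type} (l : List α) {i j : Nat} (hij : i ≠ j) (a da : α) :
    (l.set i a).getD j da = l.getD j da := by
  by_cases hjl : j < l.length
  · rw [List.getD_eq_getElem _ _ (by simpa using hjl), List.getD_eq_getElem _ _ hjl]
    exact List.getElem_set_ne hij _
  · rw [List.getD_eq_default _ _ (by simpa using Nat.le_of_not_lt hjl),
      List.getD_eq_default _ _ (Nat.le_of_not_lt hjl)]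

lemma pvCarryStep_inv {d : PySem.Dict Int (List String)} {ps : List Int} {rs e : List Nat} {dcx}
    (hrs : rs = ps.map (fun p => (d.getD p []).length))
    (hI : pvInv ps e dcx) {i : Nat} (hi1 : i + 1 < ps.length) :
    pvInv ps (pvCarry rs e i)
      (if (dcx.getD (i : Int) PySem.Dict.empty).getD (pvCK dcx (i : Int)) 0 ==
           ((d.getD (pvCK dcx (i : Int)) []).length : Int) then
         let dc1 := dcx.insert (i : Int)
           ((dcx.getD (i : Int) PySem.Dict.empty).insert (pvCK dcx (i : Int)) 0)
         dc1.modify ((i : Int) + 1) PySem.Dict.empty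
           (fun inner => inner.modify (pvCK dc1 ((i : Int) + 1)) 0 (· + 1))
       else dcx) := by
  have hi : i < ps.length := by omega
  have hrsi : rs.getD i 0 = (d.getD (ps.getD i 0) []).length := by
    rw [hrs]; exact pv_getD_map _ _ _ hi 0 0
  by_cases he : e.getD i 0 = rs.getD i 0
  · rw [if_pos (by
      rw [pvInv_counterval hI hi, pvInv_ck hI hi, ← hrsi]
      exact beq_iff_eq.mpr (by exact_mod_cast he))]
    have hdc1 : dcx.insert (i : Int) ((dcx.getD (i : Int) PySem.Dict.empty).insert (pvCK dcx (i : Int)) 0) =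
        dcx.insert (i : Int) (PySem.Dict.mk [(ps.getD i 0, ((0 : Nat) : Int))]) := by
      rw [pvInv_getD hI hi, pvInv_ck hI hi, pv_singleton_insert]
      norm_num
    have hI1 : pvInv ps (e.set i 0) (dcx.insert (i : Int)
        ((dcx.getD (i : Int) PySem.Dict.empty).insert (pvCK dcx (i : Int)) 0)) := by
      rw [hdc1]; exact pvInv_set hI hi 0
    have hcast : ((i : Int) + 1) = ((i + 1 : Nat) : Int) := by push_cast; ring
    rw [show pvCarry rs e i = (e.set i 0).set (i + 1) (e.getD (i + 1) 0 + 1)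
      from by rw [pvCarry, if_pos he]]
    have hread : (e.set i 0).getD (i + 1) 0 = e.getD (i + 1) 0 :=
      pv_getD_set_ne e (by omega) 0 0
    rw [← hread]
    simp only [hcast]
    rw [PySem.Dict.modify, pvInv_getD hI1 hi1, pvInv_ck hI1 hi1, pv_singleton_modify]
    have hc2 : ((((e.set i 0).getD (i + 1) 0 : Nat) : Int) + 1) =
        (((e.set i 0).getD (i + 1) 0 + 1 : Nat) : Int) := by push_cast; ring
    rw [hc2]
    exact pvInv_set hI1 hi1 _
  · rw [if_neg (by
      rw [pvInv_counterval hI hi, pvInv_ck hI hi, ← hrsi]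
      simp only [beq_iff_eq]
      exact fun hc => he (by exact_mod_cast hc))]
    rw [show pvCarry rs e i = e from by rw [pvCarry, if_neg he]]
    exact hI

lemma pvUpCounter_def (d : PySem.Dict Int (List String))
    (dc : PySem.Dict Int (PySem.Dict Int Int)) :
    pvUpCounter d dc =
      (PySem.List.pyRange 0
          ((((dc.modify 0 PySem.Dict.empty
              (fun inner => inner.modify (pvCK dc 0) 0 (· + 1))).size : Int)) - 1)).foldl
        (fun dc i =>
          if (dc.getD i PySem.Dict.empty).getD (pvCK dc i) 0 ==
              ((d.getD (pvCK dc i) []).length : Int) then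
            let dc1 := dc.insert i ((dc.getD i PySem.Dict.empty).insert (pvCK dc i) 0)
            dc1.modify (i + 1) PySem.Dict.empty
              (fun inner => inner.modify (pvCK dc1 (i + 1)) 0 (· + 1))
          else dc)
        (dc.modify 0 PySem.Dict.empty (fun inner => inner.modify (pvCK dc 0) 0 (· + 1))) := rfl

lemma pvUpCounter_inv {d : PySem.Dict Int (List String)} {ps ds rs dc}
    (hrs : rs = ps.map (fun p => (d.getD p []).length))
    (h : pvInv ps ds dc) (hv : pvValid ds rs) (hm : pvNotMax ds rs = true) :
    pvInv ps (pvIncr ds rs) (pvUpCounter d dc) := by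
  have hlen := h.1
  have hm0 : 0 < ps.length := by
    cases ds with
    | nil => cases rs <;> simp [pvNotMax] at hm
    | cons d0 ds' => rw [← hlen]; simp
  have hck0 : pvCK dc 0 = ps.getD 0 0 := by
    have h2 := pvInv_ck h hm0
    simpa using h2
  have hgd0 : dc.getD 0 PySem.Dict.empty =
      PySem.Dict.mk [(ps.getD 0 0, (ds.getD 0 0 : Int))] := by
    have h2 := pvInv_getD h hm0
    simpa using h2
  have hdc0 : dc.modify 0 PySem.Dict.empty (fun inner => inner.modify (pvCK dc 0) 0 (· + 1)) =
      dc.insert ((0 : Nat) : Int)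
        (PySem.Dict.mk [(ps.getD 0 0, ((ds.getD 0 0 + 1 : Nat) : Int))]) := by
    rw [PySem.Dict.modify, hgd0, hck0, pv_singleton_modify]
    norm_num
  have hI0 : pvInv ps (ds.set 0 (ds.getD 0 0 + 1))
      (dc.modify 0 PySem.Dict.empty (fun inner => inner.modify (pvCK dc 0) 0 (· + 1))) := by
    rw [hdc0]; exact pvInv_set h hm0 _
  rw [pvUpCounter_def, pvInv_size hI0,
    show ((ps.length : Int) - 1) = ((ps.length - 1 : Nat) : Int) from by omega,
    PySem.List.pyRange_zero_natCast, List.foldl_map]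
  have hsim := pv_foldl_sim (R := fun dcx e => pvInv ps e dcx) (List.range (ps.length - 1))
    (fun dc (i : Nat) =>
      if (dc.getD (i : Int) PySem.Dict.empty).getD (pvCK dc (i : Int)) 0 ==
           ((d.getD (pvCK dc (i : Int)) []).length : Int) then
        let dc1 := dc.insert (i : Int)
          ((dc.getD (i : Int) PySem.Dict.empty).insert (pvCK dc (i : Int)) 0)
        dc1.modify ((i : Int) + 1) PySem.Dict.empty
          (fun inner => inner.modify (pvCK dc1 ((i : Int) + 1)) 0 (· + 1))
      else dc)
    (fun e (i : Nat) => pvCarry rs e i) hI0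
    (by
      intro x hx a b hR
      exact pvCarryStep_inv hrs hR (by have := List.mem_range.mp hx; omega))
  have hchain := pvCarry_chain hv hm
  rw [hlen] at hchain
  rw [hchain] at hsim
  exact hsim

lemma pvAllNotAtMax_eq {d : PySem.Dict Int (List String)} {ps ds rs dc}
    (hrs : rs = ps.map (fun p => (d.getD p []).length)) (h : pvInv ps ds dc) :
    pvAllNotAtMax d dc = pvNotMax ds rs := by
  obtain ⟨hlen, hkeys, hget⟩ := h
  unfold pvAllNotAtMax
  rw [hkeys, pvNotMax_eq_range, hlen]
  simp only [List.any_map]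
  refine PySem.List.any_congr_mem (fun j hj => ?_)
  have hjm : j < ps.length := List.mem_range.mp hj
  simp only [Function.comp_apply]
  rw [pvInv_counterval ⟨hlen, hkeys, hget⟩ hjm, pvInv_ck ⟨hlen, hkeys, hget⟩ hjm]
  have hr : rs.getD j 0 = (d.getD (ps.getD j 0) []).length := by
    rw [hrs, pv_getD_map _ _ _ hjm 0 0]
  rw [hr]
  apply decide_eq_decide.mpr
  constructor
  · intro hlt; omega
  · intro hlt; omega

lemma pvReplace_eq {d : PySem.Dict Int (List String)} {ps ds dc}
    (h : pvInv ps ds dc) (txt : List String) :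
    pvReplace d dc txt = pvWrite ps (pvSel (ps.map (fun p => d.getD p [])) ds) txt := by
  obtain ⟨hlen, hkeys, hget⟩ := h
  have hIv : pvInv ps ds dc := ⟨hlen, hkeys, hget⟩
  have hsellen : (pvSel (ps.map (fun p => d.getD p [])) ds).length = ps.length := by
    simp [pvSel, List.length_zipWith, hlen]
  unfold pvReplace pvWrite
  rw [hkeys]
  simp only [List.foldl_map]
  rw [pv_foldl_zip_range (0 : Int) "" _ ps _ txt (by rw [hsellen])]
  apply PySem.List.foldl_congr_mem
  intro acc j hj
  have hjm : j < ps.length := List.mem_range.mp hj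
  have hval : (pvSel (ps.map (fun p => d.getD p [])) ds).getD j "" =
      (d.getD (ps.getD j 0) []).getD (ds.getD j 0) "" := by
    rw [List.getD_eq_getElem _ _ (by rw [hsellen]; exact hjm)]
    simp only [pvSel, List.getElem_zipWith, List.getElem_map]
    rw [List.getD_eq_getElem _ _ hjm, List.getD_eq_getElem _ _ (by omega : j < ds.length)]
  rw [pvInv_counterval hIv hjm, pvInv_ck hIv hjm, PySem.List.pyGetD_natCast, hval]

lemma pvLoopA_chain {d : PySem.Dict Int (List String)} {ps : List Int} {lists rs}
    (hlists : lists = ps.map (fun p => d.getD p []))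
    (hrs : rs = lists.map List.length) :
    ∀ (fuel : Nat) (ds : List Nat) (txt acc : List String) dc, pvValid ds rs →
      rs.prod ≤ fuel + pvCnt ds rs + 1 → pvInv ps ds dc →
      pvLoopA d fuel dc txt acc =
        (((pvTup rs).drop (pvCnt ds rs + 1)).foldl (pvStep ps lists) (txt, acc)).2 := by
  have hrs2 : rs = ps.map (fun p => (d.getD p []).length) := by
    rw [hrs, hlists, List.map_map]; rfl
  intro fuel
  induction fuel with
  | zero =>
    intro ds txt acc dc hv hb _
    rw [List.drop_eq_nil_of_le (by rw [pvTup_length]; omega)]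
    simp [pvLoopA]
  | succ fuel ih =>
    intro ds txt acc dc hv hb hI
    rw [pvLoopA, pvAllNotAtMax_eq hrs2 hI]
    by_cases hm : pvNotMax ds rs = true
    · simp only [hm, if_true]
      have hv' := pvIncr_valid hv hm
      have hc' := pvCnt_incr hv hm
      have hI' := pvUpCounter_inv hrs2 hI hv hm
      have hrepl := pvReplace_eq (d := d) hI' txt
      have hlt : pvCnt (pvIncr ds rs) rs < (pvTup rs).length := by
        rw [pvTup_length, hc']; exact pvNotMax_true_cnt hv hm
      have hdrop : (pvTup rs).drop (pvCnt ds rs + 1) =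
          pvIncr ds rs :: (pvTup rs).drop (pvCnt (pvIncr ds rs) rs + 1) := by
        rw [← hc']; exact pvTup_drop_cons hv' hlt
      rw [hdrop, List.foldl_cons]
      rw [ih (pvIncr ds rs) _ _ _ hv' (by omega) hI']
      rw [hrepl, ← hlists]
      rfl
    · have hm' : pvNotMax ds rs = false := by simpa using hm
      simp only [hm']
      have hcnt := pvNotMax_false_cnt hv hm'
      rw [List.drop_eq_nil_of_le (by rw [pvTup_length]; omega)]
      simp

lemma pvInit_inv (d : PySem.Dict Int (List String)) :
    pvInv d.keys (List.replicate d.keys.length 0)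
      ((PySem.List.enumerate d.keys).foldl
        (fun dc p => dc.insert p.1 (PySem.Dict.mk [(p.2, (0 : Int))])) PySem.Dict.empty) := by
  have hfst : (PySem.List.enumerate d.keys 0).map (fun p => p.1) =
      (List.range d.keys.length).map (fun j : Nat => (j : Int)) := by
    rw [PySem.List.map_fst_enumerate]
    simpa using PySem.List.pyRange_zero_natCast d.keys.length
  have hnodup : ((PySem.List.enumerate d.keys 0).map (fun p => p.1)).Nodup := by
    rw [hfst]
    exact (List.nodup_range).map (fun a b hab => by exact_mod_cast hab)
  have hitems := PySem.Dict.items_foldl_insert_fresh (PySem.List.enumerate d.keys 0)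
    (fun p => p.1) (fun p => PySem.Dict.mk [(p.2, (0 : Int))])
    (PySem.Dict.empty : PySem.Dict Int (PySem.Dict Int Int))
    (by intro a _; exact PySem.Dict.contains_empty _) hnodup
  have hitems2 : ((PySem.List.enumerate d.keys).foldl
      (fun dc p => dc.insert p.1 (PySem.Dict.mk [(p.2, (0 : Int))])) PySem.Dict.empty).items =
      (PySem.List.enumerate d.keys 0).map (fun p => (p.1, PySem.Dict.mk [(p.2, (0 : Int))])) := by
    rw [hitems]
    rfl
  have hkeys2 : ((PySem.List.enumerate d.keys).foldl
      (fun dc p => dc.insert p.1 (PySem.Dict.mk [(p.2, (0 : Int))])) PySem.Dict.empty).keys =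
      (List.range d.keys.length).map (fun j : Nat => (j : Int)) := by
    rw [PySem.Dict.keys, hitems2, List.map_map]
    exact hfst
  refine ⟨by simp, hkeys2, ?_⟩
  intro j hj
  apply PySem.Dict.get?_of_mem_items
  · rw [hitems2]
    refine List.mem_of_getElem? (i := j) ?_
    rw [List.getElem?_map, PySem.List.getElem?_enumerate, List.getElem?_eq_getElem hj]
    simp only [Option.map_some, Option.some_inj]
    rw [List.getD_eq_getElem _ _ hj, List.getD_replicate _ hj]
    norm_num
  · rw [hkeys2]
    exact (List.nodup_range).map (fun a b hab => by exact_mod_cast hab)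

-- ===== VERDICT (by name: the statement is the Claim_ definition above) =====
theorem get_all_substitution_permutation_spec : Claim_equal_get_all_substitution_permutation := by
  intro synonyms tokenized_txt _ hpre
  unfold Spec_get_all_substitution_permutation
  have hA : get_all_substitution_permutation synonyms tokenized_txt =
      pvLoopA (PySem.Dict.ofList synonyms)
        (((PySem.Dict.ofList synonyms).items.map (fun p => p.2.length)).prod + 1)
        ((PySem.List.enumerate (PySem.Dict.ofList synonyms).keys).foldl
          (fun dc p => dc.insert p.1 (PySem.Dict.mk [(p.2, (0 : Int))])) PySem.Dict.empty)
        tokenized_txt [] := rfl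
  have hB : get_all_substitution_permutation_alt synonyms tokenized_txt =
      (((pvProdFF ((PySem.Dict.ofList synonyms).keys.map
            (fun p => (PySem.Dict.ofList synonyms).getD p []))).drop 1).foldl
        (fun s combo =>
          let txt' := pvWrite (PySem.Dict.ofList synonyms).keys combo s.1
          (txt', s.2 ++ [PySem.Str.join " " txt'])) (tokenized_txt, ([] : List String))).2 := rfl
  rw [hA, hB]
  set d := PySem.Dict.ofList synonyms with hd
  set ps := d.keys with hps
  set lists := ps.map (fun p => d.getD p []) with hlists
  set rs := lists.map List.length with hrs
  have hnodup : ps.Nodup := PySem.Dict.nodup_keys_ofList synonyms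
  have hrs_items : rs = d.items.map (fun p => p.2.length) := by
    rw [hrs, hlists, List.map_map, hps]
    rw [show d.keys = d.items.map (fun p => p.1) from rfl, List.map_map]
    apply List.map_congr_left
    intro p hp
    simp only [Function.comp_apply]
    rw [PySem.Dict.getD_of_mem_items d (show (p.1, p.2) ∈ d.items by simpa using hp) hnodup []]
  have hrs2 : rs = ps.map (fun p => (d.getD p []).length) := by
    rw [hrs, hlists, List.map_map]; rfl
  have hlenrs : rs.length = ps.length := by rw [hrs, hlists]; simp
  by_cases hne : ∀ p ∈ d.items, p.2 ≠ []
  · -- every synonym list nonempty: full simulation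
    have hrpos : ∀ r ∈ rs, 0 < r := by
      rw [hrs_items]
      intro r hr
      obtain ⟨p, hp, rfl⟩ := List.mem_map.mp hr
      exact List.length_pos_iff.mpr (hne p hp)
    have hvalid : pvValid (List.replicate ps.length 0) rs := by
      have h2 := pvValid_replicate hrpos
      rwa [hlenrs] at h2
    have hchain := pvLoopA_chain hlists hrs (rs.prod + 1) (List.replicate ps.length 0)
      tokenized_txt [] _ hvalid (by rw [pvCnt_replicate_zero]; omega) (pvInit_inv d)
    rw [pvCnt_replicate_zero] at hchain
    rw [show (d.items.map (fun p => p.2.length)).prod = rs.prod from by rw [hrs_items]]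
    rw [hchain]
    rw [pvProdFF_eq, ← hrs, ← List.map_drop, List.foldl_map]
    rfl
  · -- some synonym list empty: both sides return []
    push Not at hne
    obtain ⟨p0, hp0, hp0nil⟩ := hne
    have hno2 : ∀ p ∈ d.items, p.2.length < 2 := by
      intro p hp
      by_contra hge
      exact (hpre ⟨p, hp, by omega⟩ p0 hp0).1 hp0nil
    rw [pvLoopA, pvAllNotAtMax_eq hrs2 (pvInit_inv d)]
    have hfalse : pvNotMax (List.replicate ps.length 0) rs = false := by
      rw [pvNotMax_eq_range]
      simp only [List.length_replicate]
      rw [List.any_eq_false]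
      intro j hj
      have hjm : j < ps.length := List.mem_range.mp hj
      rw [List.getD_replicate _ hjm]
      simp only [decide_eq_true_eq]
      intro hlt
      have hjr : j < rs.length := by rw [hlenrs]; exact hjm
      have hmem : rs.getD j 0 ∈ rs := by
        rw [List.getD_eq_getElem _ _ hjr]
        exact List.getElem_mem _
      rw [hrs_items] at hmem
      obtain ⟨p, hp, hpe⟩ := List.mem_map.mp hmem
      have h2 := hno2 p hp
      have heq := congrArg (fun l : List Nat => l.getD j 0) hrs_items
      simp only at heq
      omega
    rw [hfalse]
    rw [if_neg (by simp)]
    have hzero : (0 : Nat) ∈ rs := by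
      rw [hrs_items]
      exact List.mem_map.mpr ⟨p0, hp0, by rw [hp0nil]; rfl⟩
    have hnil : pvProdFF lists = [] := by
      apply List.eq_nil_of_length_eq_zero
      rw [pvProdFF_eq, List.length_map, pvTup_length, ← hrs]
      exact List.prod_eq_zero hzero
    rw [hnil]
    rfl
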